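-- pv_equiv track=rewrite | github.com/orbti/Udacity-DataStructures-Algorithms | P0/Task4.py | isTelemarketer
-- ===== SOURCE A (Python) =====
-- def noneTelemarketers(texts, calls):
--     noneTelemarketers = {text[0] for text in texts}
--     noneTelemarketers.update({text[1] for text in texts})
--     noneTelemarketers.update({call[1] for call in calls})
--     return noneTelemarketers
--
-- def isTelemarketer(texts, calls):
--     none_telemarketers = noneTelemarketers(texts, calls)
--     is_telemarketer = set()
--     for call in calls:
--         if call[0] in none_telemarketers:
--             continue
--         is_telemarketer.add(call[0])
--     return is_telemarketer
-- ===== SOURCE B (Python) =====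
-- def isTelemarketer(texts, calls):
--     # Single dict state machine: a number maps to True only while it is a
--     # candidate telemarketer (seen as a call source and never excluded).
--     status = {}
--     for a, b in texts:
--         status[a] = False
--         status[b] = False
--     for src, dst in calls:
--         if src not in status:
--             status[src] = True
--         status[dst] = False
--     return {num for num, flag in status.items() if flag}
-- ===== Notes on version B (the rewrite author's own statement) =====
-- stated objective: alternative
-- what changed: Replaces A's two-phase exclusion-set-then-filter-the-calls design with a single dict used as a per-number state machine: every text participant and call receiver is flagged False, a fresh call source is flagged True, and the answer is the keys still flagged True; no set membership test against a separately built exclusion set remains.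
import Mathlib
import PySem

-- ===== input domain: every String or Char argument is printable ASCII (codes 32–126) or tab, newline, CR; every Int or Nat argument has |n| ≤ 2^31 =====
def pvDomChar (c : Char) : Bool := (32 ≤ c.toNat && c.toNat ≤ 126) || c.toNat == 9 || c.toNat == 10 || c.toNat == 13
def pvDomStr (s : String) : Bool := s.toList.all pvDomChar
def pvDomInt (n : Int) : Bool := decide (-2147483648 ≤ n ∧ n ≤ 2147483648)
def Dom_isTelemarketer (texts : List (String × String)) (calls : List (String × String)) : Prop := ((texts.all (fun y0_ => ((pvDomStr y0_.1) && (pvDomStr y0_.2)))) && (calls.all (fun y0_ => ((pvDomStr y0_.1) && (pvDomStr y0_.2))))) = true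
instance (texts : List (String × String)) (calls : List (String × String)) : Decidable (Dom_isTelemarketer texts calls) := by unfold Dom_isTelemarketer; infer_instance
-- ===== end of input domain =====

-- B replaces A's exclusion-set-then-filter-the-calls design by one dict used as a per-number
-- state machine (flag True only while a number is a live candidate); same cost, different shape.

-- ===== PORT A =====
def noneTelemarketersA (texts : List (String × String)) (calls : List (String × String)) : PySem.Set String :=
  let s0 := PySem.Set.ofList (texts.map (fun text => text.1))
  let s1 := PySem.Set.update s0 (PySem.Set.ofList (texts.map (fun text => text.2)))
  PySem.Set.update s1 (PySem.Set.ofList (calls.map (fun call => call.2)))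

def isTelemarketer (texts : List (String × String)) (calls : List (String × String)) : List String :=
  let none_telemarketers := noneTelemarketersA texts calls
  calls.foldl (fun is_t call =>
    if PySem.Set.contains none_telemarketers call.1 then is_t
    else PySem.Set.add is_t call.1) PySem.Set.empty

-- ===== PORT B =====
def isTelemarketer_alt (texts : List (String × String)) (calls : List (String × String)) : List String :=
  let d0 : PySem.Dict String Bool :=
    texts.foldl (fun d t => (d.insert t.1 false).insert t.2 false) PySem.Dict.empty
  let d1 :=
    calls.foldl (fun d c => (if d.contains c.1 then d else d.insert c.1 true).insert c.2 false) d0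
  PySem.Set.ofList ((d1.items.filter (fun kv => kv.2)).map (fun kv => kv.1))

-- ===== PRECONDITION & SPEC =====
def Spec_isTelemarketer (texts : List (String × String)) (calls : List (String × String)) (out : List String) : Prop := out = isTelemarketer_alt texts calls
instance (texts : List (String × String)) (calls : List (String × String)) (out : List String) : Decidable (Spec_isTelemarketer texts calls out) := by unfold Spec_isTelemarketer; infer_instance

-- ===== CLAIM (what is proved, stated in full; the proofs are below) =====
def Claim_equal_isTelemarketer : Prop := ∀ (texts : List (String × String)) (calls : List (String × String)), Dom_isTelemarketer texts calls → Spec_isTelemarketer texts calls (isTelemarketer texts calls)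

-- ===== LEMMAS AND PROOFS =====

def trueKeys (d : PySem.Dict String Bool) : List String :=
  (d.items.filter (fun kv => kv.2)).map (fun kv => kv.1)

theorem trueKeys_insert_false (d : PySem.Dict String Bool) (k : String) :
    trueKeys (d.insert k false) = (trueKeys d).filter (fun x => x ≠ k) := by
  by_cases hc : d.contains k = true
  · unfold trueKeys
    rw [PySem.Dict.items_insert_of_contains d false hc]
    rw [List.filter_map, List.filter_map, List.filter_filter]
    have h1 : ∀ p : String × Bool, p ∈ d.items →
        (((fun kv : String × Bool => kv.2) ∘ (fun p : String × Bool => if (p.1 == k) = true then (k, false) else p)) p)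
        = (((fun x : String => decide (x ≠ k)) ∘ (fun kv : String × Bool => kv.1)) p && p.2) := by
      intro p _; by_cases h : p.1 = k <;> simp [Function.comp, h]
    rw [List.filter_congr h1]
    rw [List.map_map]
    apply List.map_congr_left
    intro p hp
    have := (List.mem_filter.mp hp).2
    simp only [Function.comp, Bool.and_eq_true, decide_eq_true_eq] at this
    simp [Function.comp, this.1]
  · have hk : k ∉ d.keys := fun h => hc ((PySem.Dict.contains_iff_mem_keys d k).mpr h)
    have hc' : d.contains k = false := by simpa using hc
    unfold trueKeys
    rw [PySem.Dict.items_insert_of_not_contains d false hc']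
    rw [List.filter_append]
    have h2 : List.filter (fun kv : String × Bool => kv.2) [(k, false)] = [] := rfl
    rw [h2, List.append_nil]
    symm
    apply List.filter_eq_self.mpr
    intro x hx
    have hxk : x ∈ d.keys := by
      rcases List.mem_map.mp hx with ⟨kv, hkv, rfl⟩
      exact List.mem_map.mpr ⟨kv, (List.mem_filter.mp hkv).1, rfl⟩
    simp; rintro rfl; exact hk hxk

theorem trueKeys_insert_true_fresh (d : PySem.Dict String Bool) (k : String)
    (h : d.contains k = false) : trueKeys (d.insert k true) = trueKeys d ++ [k] := by
  unfold trueKeys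
  rw [PySem.Dict.items_insert_of_not_contains d true h]
  simp [List.filter_append]

theorem trueKeys_text_loop (texts : List (String × String)) :
    ∀ d : PySem.Dict String Bool, trueKeys d = [] →
      trueKeys (texts.foldl (fun d t => (d.insert t.1 false).insert t.2 false) d) = [] := by
  induction texts with
  | nil => intro d h; exact h
  | cons t ts ih =>
    intro d h
    simp only [List.foldl_cons]
    apply ih
    rw [trueKeys_insert_false, trueKeys_insert_false, h]
    rfl

theorem mem_keys_text_loop (texts : List (String × String)) (x : String) :
    ∀ d : PySem.Dict String Bool,
      (x ∈ (texts.foldl (fun d t => (d.insert t.1 false).insert t.2 false) d).keys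
        ↔ x ∈ d.keys ∨ x ∈ texts.map (fun t => t.1) ∨ x ∈ texts.map (fun t => t.2)) := by
  induction texts with
  | nil => intro d; simp
  | cons t ts ih =>
    intro d
    simp only [List.foldl_cons]
    rw [ih]
    simp [PySem.Dict.mem_keys_insert]
    tauto

set_option maxHeartbeats 1000000 in
theorem trueKeys_call_loop (cs : List (String × String)) :
    ∀ d : PySem.Dict String Bool,
      trueKeys (cs.foldl
          (fun d c => (if d.contains c.1 then d else d.insert c.1 true).insert c.2 false) d)
      = (trueKeys d ++ (PySem.Set.ofList (cs.map (fun c => c.1))).filter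
            (fun x => !decide (x ∈ d.keys))).filter
          (fun x => !decide (x ∈ cs.map (fun c => c.2))) := by
  induction cs with
  | nil =>
    intro d
    simp [PySem.Set.ofList]
  | cons c cs ih =>
    intro d
    simp only [List.foldl_cons, List.map_cons]
    by_cases hc1 : d.contains c.1 = true
    · have hmem1 : c.1 ∈ d.keys := (PySem.Dict.contains_iff_mem_keys d c.1).mp hc1
      simp only [hc1, if_true]
      rw [ih, trueKeys_insert_false, PySem.Set.ofList_cons]
      simp only [PySem.Set.discard, List.filter_append, List.filter_filter, List.filter_cons]
      have hdrop : (!decide (c.1 ∈ d.keys)) = false := by simp [hmem1]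
      rw [hdrop]
      simp only [Bool.false_eq_true, if_false]
      congr 1
      · apply List.filter_congr
        intro x hx
        by_cases h2 : x = c.2 <;> simp [h2, List.mem_cons]
      · rw [List.filter_filter]
        apply List.filter_congr
        intro x hx
        simp only [PySem.Dict.mem_keys_insert, List.mem_cons]
        by_cases h1 : x = c.1 <;> by_cases h2 : x = c.2 <;>
          by_cases hk : x ∈ d.keys <;> simp [h1, h2, hk] <;> try tauto
    · have hc1' : d.contains c.1 = false := by simpa using hc1
      have hmem1 : c.1 ∉ d.keys := fun h => by
        rw [(PySem.Dict.contains_iff_mem_keys d c.1).mpr h] at hc1'; cases hc1'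
      simp only [hc1', Bool.false_eq_true, if_false]
      rw [ih, trueKeys_insert_false, trueKeys_insert_true_fresh d c.1 hc1', PySem.Set.ofList_cons]
      simp only [PySem.Set.discard, List.filter_append, List.filter_filter]
      have h1 : List.filter (fun a => !decide (a ∈ List.map (fun c => c.2) cs) && decide (a ≠ c.2)) (trueKeys d)
          = List.filter (fun x => !decide (x ∈ c.2 :: List.map (fun c => c.2) cs)) (trueKeys d) := by
        apply List.filter_congr; intro x hx
        by_cases h2 : x = c.2 <;> simp [h2, List.mem_cons]
      have h3 : List.filter (fun a => !decide (a ∈ List.map (fun c => c.2) cs) && !decide (a ∈ ((d.insert c.1 true).insert c.2 false).keys)) (PySem.Set.ofList (List.map (fun c => c.1) cs))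
          = List.filter (fun a => !decide (a ∈ c.2 :: List.map (fun c => c.2) cs) && !decide (a ∈ d.keys)) (List.filter (fun y => !y == c.1) (PySem.Set.ofList (List.map (fun c => c.1) cs))) := by
        rw [List.filter_filter]
        apply List.filter_congr; intro x hx
        simp only [PySem.Dict.mem_keys_insert, List.mem_cons]
        by_cases hA : x = c.1 <;> by_cases hB : x = c.2 <;> by_cases hk : x ∈ d.keys <;>
          simp [hA, hB, hk] <;> try tauto
      rw [h1, h3]
      by_cases h12 : c.1 = c.2 <;> by_cases hs : c.1 ∈ List.map (fun c => c.2) cs <;>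
        simp [List.filter_cons, h12, hs, hmem1, List.mem_cons, List.append_assoc] <;>
        congr 1 <;>
        first
          | rfl
          | (apply List.filter_congr
             intro x hx
             by_cases hA : x = c.1 <;> by_cases hB : x = c.2 <;> by_cases hk : x ∈ d.keys <;>
               (try simp [hA, hB, hk, List.mem_cons]) <;> (try tauto) <;> (try simp_all [List.mem_cons]) <;> (try simp only [List.mem_cons, Bool.decide_or, Bool.not_or, beq_eq_decide]) <;> (try (by_cases hC : x = c.2 <;> simp [hC, List.mem_cons])))
          | (apply congrArg (List.cons c.1)
             apply List.filter_congr
             intro x hx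
             by_cases hA : x = c.1 <;> by_cases hB : x = c.2 <;> by_cases hk : x ∈ d.keys <;>
               (try simp [hA, hB, hk, List.mem_cons]) <;> (try tauto) <;> (try simp_all [List.mem_cons]) <;> (try simp only [List.mem_cons, Bool.decide_or, Bool.not_or, beq_eq_decide]) <;> (try (by_cases hC : x = c.2 <;> simp [hC, List.mem_cons])))

theorem foldl_addIf_eq_filter_foldl {α : Type} [BEq α] [LawfulBEq α]
    (E : PySem.Set α) :
    ∀ (xs : List α) (acc : PySem.Set α),
      xs.foldl (fun s x => if PySem.Set.contains E x then s else PySem.Set.add s x)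
        (acc.filter (fun x => !PySem.Set.contains E x))
      = (xs.foldl PySem.Set.add acc).filter (fun x => !PySem.Set.contains E x) := by
  intro xs
  induction xs with
  | nil => intro acc; rfl
  | cons x xs ih =>
    intro acc
    simp only [List.foldl_cons]
    have hstep :
        (if PySem.Set.contains E x then acc.filter (fun y => !PySem.Set.contains E y)
         else PySem.Set.add (acc.filter (fun y => !PySem.Set.contains E y)) x)
        = (PySem.Set.add acc x).filter (fun y => !PySem.Set.contains E y) := by
      by_cases hc : PySem.Set.contains E x = true
      · have hE : x ∈ E := (PySem.Set.contains_iff E x).mp hc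
        simp only [hc, if_true, PySem.Set.add_eq_ite]
        by_cases hm : x ∈ acc
        · simp [hm]
        · simp [hm, List.filter_append, hE]
      · have hE : x ∉ E := fun h => hc ((PySem.Set.contains_iff E x).mpr h)
        simp only [hc]
        rw [PySem.Set.add_eq_ite, PySem.Set.add_eq_ite]
        by_cases hm : x ∈ acc
        · have hmf : x ∈ acc.filter (fun y => !PySem.Set.contains E y) :=
            List.mem_filter.mpr ⟨hm, by simp [hE]⟩
          simp [hm, hE]
        · have hmf : x ∉ acc.filter (fun y => !PySem.Set.contains E y) :=
            fun h => hm (List.mem_filter.mp h).1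
          simp [hm, List.filter_append, hE]
    rw [hstep, ih]

theorem alt_eq (texts calls : List (String × String)) :
    isTelemarketer_alt texts calls
    = ((PySem.Set.ofList (calls.map (fun c => c.1))).filter
        (fun x => !decide (x ∈ (texts.foldl (fun d t => (d.insert t.1 false).insert t.2 false) PySem.Dict.empty).keys))).filter
        (fun x => !decide (x ∈ calls.map (fun c => c.2))) := by
  show PySem.Set.ofList (trueKeys _) = _
  rw [trueKeys_call_loop calls _, trueKeys_text_loop texts _ rfl]
  simp only [List.nil_append]
  exact PySem.Set.ofList_eq_self_of_nodup _ (((PySem.Set.nodup_ofList _).filter _).filter _)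

-- ===== VERDICT (by name: the statement is the Claim_ definition above) =====
theorem isTelemarketer_spec : Claim_equal_isTelemarketer := by
  intro texts calls _
  unfold Spec_isTelemarketer
  rw [alt_eq]
  calc isTelemarketer texts calls
      = (PySem.Set.ofList (calls.map (fun c => c.1))).filter
          (fun x => !PySem.Set.contains (noneTelemarketersA texts calls) x) := by
        show List.foldl _ PySem.Set.empty calls = _
        rw [PySem.Set.ofList_eq_foldl, ← foldl_addIf_eq_filter_foldl]
        simp only [List.filter_nil, List.foldl_map]
        rfl
    _ = _ := by
        rw [List.filter_filter]
        apply List.filter_congr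
        intro x hx
        have hkeys := mem_keys_text_loop texts x PySem.Dict.empty
        rw [Bool.eq_iff_iff]
        simp [noneTelemarketersA, PySem.Set.mem_update,
          PySem.Set.mem_ofList, hkeys]
        tauto
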